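-- pv_equiv track=rewrite | github.com/openai/deeptype | learning/batchifier.py | allocate_shrunk_batches
-- ===== SOURCE A (Python) =====
-- def allocate_shrunk_batches(max_length, batch_size, lengths):
--     typical_indices = max_length * batch_size
--     i = 0
--     ranges = []
--     while i < len(lengths):
--         j = i + 1
--         current_batch_size = 1
--         longest_ex = lengths[j - 1]
--         while j < len(lengths) and j - i < batch_size:
--             # can grow?
--             new_batch_size = current_batch_size + 1
--             new_j = j + 1
--             if max(longest_ex, lengths[new_j - 1]) * new_batch_size < typical_indices:
--                 j = new_j
--                 longest_ex = max(longest_ex, lengths[new_j - 1])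
--                 current_batch_size = new_batch_size
--             else:
--                 break
--         ranges.append((i, j))
--         i = j
--     return ranges
-- ===== SOURCE B (Python) =====
-- def allocate_shrunk_batches(max_length, batch_size, lengths):
--     typical_indices = max_length * batch_size
--     ranges = []
--     start, count, longest = 0, 0, 0
--     for k in range(len(lengths)):
--         x = lengths[k]
--         if count == 0:
--             start, count, longest = k, 1, x
--         elif count < batch_size and max(longest, x) * (count + 1) < typical_indices:
--             count, longest = count + 1, max(longest, x)
--         else:
--             ranges.append((start, k))
--             start, count, longest = k, 1, x
--     if count > 0:
--         ranges.append((start, len(lengths)))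
--     return ranges
-- ===== Notes on version B (the rewrite author's own statement) =====
-- stated objective: simpler
-- what changed: A's nested while-loops (an inner grow-the-batch loop restarted by an outer loop) are flattened into one forward for-loop over the indices that maintains (start, count, longest) as explicit state and closes a batch whenever it cannot extend, appending the trailing open batch after the loop.
import Mathlib
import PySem

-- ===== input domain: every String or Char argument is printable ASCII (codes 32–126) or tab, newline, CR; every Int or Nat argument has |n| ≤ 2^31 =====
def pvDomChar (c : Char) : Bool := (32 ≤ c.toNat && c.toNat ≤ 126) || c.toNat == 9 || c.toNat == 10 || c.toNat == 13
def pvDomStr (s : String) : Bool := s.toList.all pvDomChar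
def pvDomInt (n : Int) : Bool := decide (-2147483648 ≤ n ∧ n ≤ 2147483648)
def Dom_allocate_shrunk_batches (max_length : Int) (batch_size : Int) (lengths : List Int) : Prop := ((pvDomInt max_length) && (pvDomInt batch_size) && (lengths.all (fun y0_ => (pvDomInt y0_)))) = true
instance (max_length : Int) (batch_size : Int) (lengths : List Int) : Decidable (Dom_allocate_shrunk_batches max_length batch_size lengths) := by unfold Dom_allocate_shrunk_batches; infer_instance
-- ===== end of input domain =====

-- B replaces A's nested while-loops by one forward state-machine pass over the indices (objective: simpler).

-- ===== PORT A =====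
-- A's inner while loop: state (j, current_batch_size, longest_ex); returns the final j.
-- The Nat fuel only makes the recursion structural; fuel = lengths.length is never exhausted
-- (each step increases j, which stays < lengths.length), so it changes no result.
-- Indices are always in range in A's executions, so the pyGet? lookup never misses; getD 0 is unreachable.
def pvA_inner (fuel : Nat) (typical batch_size : Int) (lengths : List Int) (i j cbs longest : Int) : Int :=
  match fuel with
  | 0 => j
  | fuel + 1 =>
    if j < (lengths.length : Int) ∧ j - i < batch_size then
      let new_batch_size := cbs + 1
      let new_j := j + 1
      let v := (PySem.List.pyGet? lengths (new_j - 1)).getD 0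
      if max longest v * new_batch_size < typical then
        pvA_inner fuel typical batch_size lengths i new_j new_batch_size (max longest v)
      else j
    else j

-- A's outer while loop, accumulating ranges (fuel as above: i strictly increases each iteration)
def pvA_outer (fuel : Nat) (typical batch_size : Int) (lengths : List Int) (i : Int) (ranges : List (Int × Int)) : List (Int × Int) :=
  match fuel with
  | 0 => ranges
  | fuel + 1 =>
    if i < (lengths.length : Int) then
      let j := i + 1
      let longest_ex := (PySem.List.pyGet? lengths (j - 1)).getD 0
      let j' := pvA_inner lengths.length typical batch_size lengths i j 1 longest_ex
      pvA_outer fuel typical batch_size lengths j' (ranges ++ [(i, j')])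
    else ranges

def allocate_shrunk_batches (max_length : Int) (batch_size : Int) (lengths : List Int) : List (Int × Int) :=
  let typical_indices := max_length * batch_size
  pvA_outer lengths.length typical_indices batch_size lengths 0 []

-- ===== PORT B =====
-- B's single for-loop over k in range(len(lengths)), state (ranges, start, count, longest);
-- fuel = lengths.length is exactly the number of iterations of the for-loop.
def pvB_loop (fuel : Nat) (typical batch_size : Int) (lengths : List Int) (k : Int)
    (ranges : List (Int × Int)) (start count longest : Int) :
    List (Int × Int) × Int × Int × Int :=
  match fuel with
  | 0 => (ranges, start, count, longest)
  | fuel + 1 =>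
    if k < (lengths.length : Int) then
      let x := (PySem.List.pyGet? lengths k).getD 0
      if count = 0 then
        pvB_loop fuel typical batch_size lengths (k + 1) ranges k 1 x
      else if count < batch_size ∧ max longest x * (count + 1) < typical then
        pvB_loop fuel typical batch_size lengths (k + 1) ranges start (count + 1) (max longest x)
      else
        pvB_loop fuel typical batch_size lengths (k + 1) (ranges ++ [(start, k)]) k 1 x
    else (ranges, start, count, longest)

def allocate_shrunk_batches_alt (max_length : Int) (batch_size : Int) (lengths : List Int) : List (Int × Int) :=
  let typical_indices := max_length * batch_size
  let s := pvB_loop lengths.length typical_indices batch_size lengths 0 [] 0 0 0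
  if 0 < s.2.2.1 then s.1 ++ [(s.2.1, (lengths.length : Int))] else s.1

-- ===== PRECONDITION & SPEC =====
def Spec_allocate_shrunk_batches (max_length : Int) (batch_size : Int) (lengths : List Int) (out : List (Int × Int)) : Prop := out = allocate_shrunk_batches_alt max_length batch_size lengths
instance (max_length : Int) (batch_size : Int) (lengths : List Int) (out : List (Int × Int)) : Decidable (Spec_allocate_shrunk_batches max_length batch_size lengths out) := by unfold Spec_allocate_shrunk_batches; infer_instance

-- ===== CLAIM (what is proved, stated in full; the proofs are below) =====
def Claim_equal_allocate_shrunk_batches : Prop := ∀ (max_length : Int) (batch_size : Int) (lengths : List Int), Dom_allocate_shrunk_batches max_length batch_size lengths → Spec_allocate_shrunk_batches max_length batch_size lengths (allocate_shrunk_batches max_length batch_size lengths)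

-- ===== LEMMAS AND PROOFS =====

-- "finalize" of B's final state: close the open batch if any
def pvFin (lengths : List Int) (s : List (Int × Int) × Int × Int × Int) : List (Int × Int) :=
  if 0 < s.2.2.1 then s.1 ++ [(s.2.1, (lengths.length : Int))] else s.1

-- past the end of the list, B's loop is the identity on the state, whatever the fuel
theorem pvB_loop_stop (fuel : Nat) (typical batch_size : Int) (lengths : List Int) (k : Int)
    (ranges : List (Int × Int)) (start count longest : Int)
    (hk : ¬ k < (lengths.length : Int)) :
    pvB_loop fuel typical batch_size lengths k ranges start count longest =
      (ranges, start, count, longest) := by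
  cases fuel with
  | zero => rfl
  | succ fuel => rw [pvB_loop, if_neg hk]

-- B's loop does not depend on the fuel, as long as the fuel covers the remaining indices
theorem pvB_loop_fuel (typical batch_size : Int) (lengths : List Int) :
    ∀ (f g : Nat) (k : Int) (ranges : List (Int × Int)) (start count longest : Int),
      ((lengths.length : Int) - k).toNat ≤ f → ((lengths.length : Int) - k).toNat ≤ g →
      pvB_loop f typical batch_size lengths k ranges start count longest =
        pvB_loop g typical batch_size lengths k ranges start count longest := by
  intro f
  induction f with
  | zero =>
    intro g k ranges start count longest hf _
    rw [pvB_loop_stop 0 _ _ _ _ _ _ _ _ (by omega), pvB_loop_stop g _ _ _ _ _ _ _ _ (by omega)]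
  | succ f ih =>
    intro g k ranges start count longest hf hg
    by_cases hk : k < (lengths.length : Int)
    · rcases g with _ | g'
      · omega
      rw [pvB_loop, pvB_loop, if_pos hk, if_pos hk]
      simp only
      by_cases h0 : count = 0
      · rw [if_pos h0, if_pos h0]; exact ih g' (k + 1) _ _ _ _ (by omega) (by omega)
      · rw [if_neg h0, if_neg h0]
        by_cases hgrow : count < batch_size ∧
            max longest ((PySem.List.pyGet? lengths k).getD 0) * (count + 1) < typical
        · rw [if_pos hgrow, if_pos hgrow]; exact ih g' (k + 1) _ _ _ _ (by omega) (by omega)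
        · rw [if_neg hgrow, if_neg hgrow]; exact ih g' (k + 1) _ _ _ _ (by omega) (by omega)
    · rw [pvB_loop_stop _ _ _ _ _ _ _ _ _ hk, pvB_loop_stop _ _ _ _ _ _ _ _ _ hk]

-- the inner loop never moves j backwards
theorem pvA_inner_ge (fuel : Nat) (typical batch_size : Int) (lengths : List Int) :
    ∀ (i j cbs longest : Int), j ≤ pvA_inner fuel typical batch_size lengths i j cbs longest := by
  induction fuel with
  | zero => intro i j cbs longest; rfl
  | succ fuel ih =>
    intro i j cbs longest
    rw [pvA_inner]
    by_cases hg : j < (lengths.length : Int) ∧ j - i < batch_size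
    · rw [if_pos hg]
      simp only
      by_cases hc : max longest ((PySem.List.pyGet? lengths (j + 1 - 1)).getD 0) * (cbs + 1) < typical
      · rw [if_pos hc]
        have := ih i (j + 1) (cbs + 1) (max longest ((PySem.List.pyGet? lengths (j + 1 - 1)).getD 0))
        omega
      · rw [if_neg hc]
    · rw [if_neg hg]

-- the inner loop never runs past the end of the list
theorem pvA_inner_le (fuel : Nat) (typical batch_size : Int) (lengths : List Int) :
    ∀ (i j cbs longest : Int), j ≤ (lengths.length : Int) →
      pvA_inner fuel typical batch_size lengths i j cbs longest ≤ (lengths.length : Int) := by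
  induction fuel with
  | zero => intro i j cbs longest hj; exact hj
  | succ fuel ih =>
    intro i j cbs longest hj
    rw [pvA_inner]
    by_cases hg : j < (lengths.length : Int) ∧ j - i < batch_size
    · rw [if_pos hg]
      simp only
      by_cases hc : max longest ((PySem.List.pyGet? lengths (j + 1 - 1)).getD 0) * (cbs + 1) < typical
      · rw [if_pos hc]; exact ih i (j + 1) (cbs + 1) _ (by omega)
      · rw [if_neg hc]; exact hj
    · rw [if_neg hg]; exact hj

-- B's loop, run from inside an open batch (start i, count = j - i ≥ 1), tracks A's inner loop:
-- it either finishes the list (closing the batch at n) or restarts exactly where A's inner loop stops.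
theorem pvB_tracks_inner (typical batch_size : Int) (lengths : List Int) (i : Int) :
    ∀ (fA fB : Nat) (j cbs longest : Int) (acc : List (Int × Int)),
      0 ≤ i → i < j → j ≤ (lengths.length : Int) → cbs = j - i →
      ((lengths.length : Int) - j).toNat ≤ fA → ((lengths.length : Int) - j).toNat ≤ fB →
      pvFin lengths (pvB_loop fB typical batch_size lengths j acc i cbs longest) =
        (if pvA_inner fA typical batch_size lengths i j cbs longest < (lengths.length : Int) then
           pvFin lengths (pvB_loop lengths.length typical batch_size lengths
             (pvA_inner fA typical batch_size lengths i j cbs longest + 1)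
             (acc ++ [(i, pvA_inner fA typical batch_size lengths i j cbs longest)])
             (pvA_inner fA typical batch_size lengths i j cbs longest) 1
             ((PySem.List.pyGet? lengths (pvA_inner fA typical batch_size lengths i j cbs longest)).getD 0))
         else acc ++ [(i, (lengths.length : Int))]) := by
  intro fA
  induction fA with
  | zero =>
    intro fB j cbs longest acc hi0 hij hjn hcbs hfA _
    -- out of inner fuel means j = length: both sides close the batch at the end of the list
    have hjeq : j = (lengths.length : Int) := by omega
    rw [pvB_loop_stop _ _ _ _ _ _ _ _ _ (by omega), pvA_inner, if_neg (by omega)]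
    simp only [pvFin]
    rw [if_pos (show (0:Int) < cbs by omega)]
  | succ fA ih =>
    intro fB j cbs longest acc hi0 hij hjn hcbs hfA hfB
    by_cases hjlt : j < (lengths.length : Int)
    · rcases fB with _ | fB'
      · omega
      by_cases hgrow : j - i < batch_size ∧
          max longest ((PySem.List.pyGet? lengths j).getD 0) * (cbs + 1) < typical
      · -- both loops extend the batch by lengths[j]
        have hstep : pvA_inner (fA + 1) typical batch_size lengths i j cbs longest =
            pvA_inner fA typical batch_size lengths i (j + 1) (cbs + 1)
              (max longest ((PySem.List.pyGet? lengths j).getD 0)) := by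
          rw [pvA_inner, if_pos (show j < (lengths.length : Int) ∧ j - i < batch_size from ⟨hjlt, hgrow.1⟩)]
          simp only [show j + 1 - 1 = j from by omega]
          rw [if_pos hgrow.2]
        rw [hstep]
        conv_lhs => rw [pvB_loop]
        rw [if_pos hjlt]
        simp only
        rw [if_neg (by omega), if_pos (show cbs < batch_size ∧
          max longest ((PySem.List.pyGet? lengths j).getD 0) * (cbs + 1) < typical from ⟨by omega, hgrow.2⟩)]
        exact ih fB' (j + 1) (cbs + 1) (max longest ((PySem.List.pyGet? lengths j).getD 0)) acc
          (by omega) (by omega) (by omega) (by omega) (by omega) (by omega)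
      · -- A's inner loop stops at j; B closes the batch (i, j) and restarts at j
        have hstopA : pvA_inner (fA + 1) typical batch_size lengths i j cbs longest = j := by
          rw [pvA_inner]
          by_cases hg : j - i < batch_size
          · rw [if_pos ⟨hjlt, hg⟩]
            simp only [show j + 1 - 1 = j from by omega]
            rw [if_neg (by intro hc; exact hgrow ⟨hg, hc⟩)]
          · rw [if_neg (by omega)]
        rw [hstopA, if_pos hjlt]
        conv_lhs => rw [pvB_loop]
        rw [if_pos hjlt]
        simp only
        rw [if_neg (by omega), if_neg (by intro hc; exact hgrow ⟨by omega, hc.2⟩)]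
        rw [pvB_loop_fuel typical batch_size lengths fB' lengths.length (j + 1) _ _ _ _
          (by omega) (by omega)]
    · -- j = length: both sides close the batch at the end of the list
      have hjeq : j = (lengths.length : Int) := by omega
      rw [pvB_loop_stop _ _ _ _ _ _ _ _ _ hjlt, pvA_inner, if_neg (by omega)]
      simp only [pvFin]
      rw [if_pos (show (0:Int) < cbs by omega)]

-- B's loop entered right after opening a batch at i equals A's outer loop from i.
theorem pvB_tracks_outer (typical batch_size : Int) (lengths : List Int) :
    ∀ (fO : Nat) (i : Int) (acc : List (Int × Int)),
      0 ≤ i → i < (lengths.length : Int) → ((lengths.length : Int) - i).toNat ≤ fO →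
      pvFin lengths (pvB_loop lengths.length typical batch_size lengths (i + 1) acc i 1
          ((PySem.List.pyGet? lengths i).getD 0)) =
        pvA_outer fO typical batch_size lengths i acc := by
  intro fO
  induction fO with
  | zero => intro i acc hi0 hin hf; omega
  | succ fO ih =>
    intro i acc hi0 hin hf
    rw [pvB_tracks_inner typical batch_size lengths i lengths.length lengths.length (i + 1) 1
        ((PySem.List.pyGet? lengths i).getD 0) acc (by omega) (by omega) (by omega) (by omega)
        (by omega) (by omega)]
    have hge := pvA_inner_ge lengths.length typical batch_size lengths i (i + 1) 1
        ((PySem.List.pyGet? lengths i).getD 0)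
    have hle := pvA_inner_le lengths.length typical batch_size lengths i (i + 1) 1
        ((PySem.List.pyGet? lengths i).getD 0) (by omega)
    conv_rhs => rw [pvA_outer]
    rw [if_pos hin]
    simp only [show i + 1 - 1 = i from by omega]
    set j' := pvA_inner lengths.length typical batch_size lengths i (i + 1) 1
        ((PySem.List.pyGet? lengths i).getD 0) with hj'
    by_cases hlt : j' < (lengths.length : Int)
    · rw [if_pos hlt]
      exact ih j' (acc ++ [(i, j')]) (by omega) hlt (by omega)
    · rw [if_neg hlt]
      have hjeq : j' = (lengths.length : Int) := by omega
      cases fO with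
      | zero => rw [pvA_outer, hjeq]
      | succ fO => rw [pvA_outer, if_neg (by omega), hjeq]

-- ===== VERDICT (by name: the statement is the Claim_ definition above) =====
theorem allocate_shrunk_batches_spec : Claim_equal_allocate_shrunk_batches := by
  intro max_length batch_size lengths _
  unfold Spec_allocate_shrunk_batches allocate_shrunk_batches allocate_shrunk_batches_alt
  simp only
  by_cases hn : (0 : Int) < (lengths.length : Int)
  · -- nonempty: B's first step opens the batch at 0, then track A's outer loop
    obtain ⟨f', hf'⟩ : ∃ f', lengths.length = f' + 1 := ⟨lengths.length - 1, by omega⟩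
    have h0 : pvB_loop lengths.length (max_length * batch_size) batch_size lengths 0 [] 0 0 0 =
        pvB_loop lengths.length (max_length * batch_size) batch_size lengths (0 + 1) [] 0 1
          ((PySem.List.pyGet? lengths 0).getD 0) := by
      conv_lhs => rw [hf', pvB_loop]
      rw [if_pos (by omega), if_pos rfl]
      exact pvB_loop_fuel (max_length * batch_size) batch_size lengths f' lengths.length
        (0 + 1) _ _ _ _ (by omega) (by omega)
    show pvA_outer lengths.length (max_length * batch_size) batch_size lengths 0 [] =
      pvFin lengths (pvB_loop lengths.length (max_length * batch_size) batch_size lengths 0 [] 0 0 0)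
    rw [h0]
    exact (pvB_tracks_outer (max_length * batch_size) batch_size lengths lengths.length 0 []
      (by omega) hn (by omega)).symm
  · -- empty list: both return []
    have h0 : lengths.length = 0 := by omega
    rw [h0]
    rfl
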